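-- pv_equiv track=rewrite | github.com/NerdyGuy109/Games | Hangman.py | replaceIndexes
-- ===== SOURCE A (Python) =====
-- def replaceIndexes(indexList, secretWord):
--     update = ""
--
--     for i in range(0, len(secretWord)):
--         if i in indexList:
--             update += secretWord[i]
--         else:
--             update += "_"
--
--     return update
-- ===== SOURCE B (Python) =====
-- def replaceIndexes(indexList, secretWord):
--     result = ["_"] * len(secretWord)
--     for i in indexList:
--         if 0 <= i < len(secretWord):
--             result[i] = secretWord[i]
--     return "".join(result)
-- ===== Notes on version B (the rewrite author's own statement) =====
-- stated objective: faster
-- what changed: B scatters the revealed letters into a prefilled '_' buffer by iterating over indexList once, instead of scanning indexList from inside a loop over every word position.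
import Mathlib
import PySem

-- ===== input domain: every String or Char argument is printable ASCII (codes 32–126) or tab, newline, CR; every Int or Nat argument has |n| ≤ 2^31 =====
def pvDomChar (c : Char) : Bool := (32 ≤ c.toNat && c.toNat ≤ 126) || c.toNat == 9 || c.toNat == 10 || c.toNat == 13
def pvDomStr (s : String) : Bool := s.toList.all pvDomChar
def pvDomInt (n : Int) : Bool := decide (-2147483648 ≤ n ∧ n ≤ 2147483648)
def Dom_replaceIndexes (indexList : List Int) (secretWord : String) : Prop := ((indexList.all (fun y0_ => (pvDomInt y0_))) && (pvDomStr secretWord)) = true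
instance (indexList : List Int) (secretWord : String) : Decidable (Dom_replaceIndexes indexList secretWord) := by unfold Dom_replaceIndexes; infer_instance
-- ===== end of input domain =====

-- B scatters the revealed letters into a prefilled '_' buffer in one pass over indexList,
-- instead of A's membership scan of indexList at every word position. Equivalence proved on all inputs.

-- ===== PORT A =====
-- Python A: loop i over range(0, len(secretWord)); append secretWord[i] if i in indexList else '_'.
def replaceIndexes (indexList : List Int) (secretWord : String) : String :=
  let cs := secretWord.toList
  let update : List Char :=
    (PySem.List.pyRange 0 cs.length 1).foldl
      (fun update i =>
        if indexList.contains i then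
          update ++ (PySem.List.pyGet? cs i).toList   -- secretWord[i]; i is always in range here
        else
          update ++ ['_'])
      []
  String.mk update

-- ===== PORT B =====
-- Python B: result = ['_'] * n; for i in indexList: if 0 <= i < n: result[i] = secretWord[i]; join.
def replaceIndexes_alt (indexList : List Int) (secretWord : String) : String :=
  let cs := secretWord.toList
  let buf : List Char :=
    indexList.foldl
      (fun b i =>
        if 0 ≤ i ∧ i < (cs.length : Int) then
          b.set i.toNat (cs.getD i.toNat '_')
        else b)
      (List.replicate cs.length '_')
  String.mk buf

-- ===== PRECONDITION & SPEC =====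
def Spec_replaceIndexes (indexList : List Int) (secretWord : String) (out : String) : Prop := out = replaceIndexes_alt indexList secretWord
instance (indexList : List Int) (secretWord : String) (out : String) : Decidable (Spec_replaceIndexes indexList secretWord out) := by unfold Spec_replaceIndexes; infer_instance

-- ===== CLAIM (what is proved, stated in full; the proofs are below) =====
def Claim_equal_replaceIndexes : Prop := ∀ (indexList : List Int) (secretWord : String), Dom_replaceIndexes indexList secretWord → Spec_replaceIndexes indexList secretWord (replaceIndexes indexList secretWord)

-- ===== LEMMAS AND PROOFS =====

-- the common value of position j
def pvCell (indexList : List Int) (cs : List Char) (j : Nat) : Char :=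
  if (j : Int) ∈ indexList then cs.getD j '_' else '_'

-- B's scatter loop preserves the buffer length
theorem pv_scatter_length (L : List Int) (cs : List Char) (b : List Char) :
    (L.foldl (fun b i =>
        if 0 ≤ i ∧ i < (cs.length : Int) then b.set i.toNat (cs.getD i.toNat '_') else b) b).length
      = b.length := by
  induction L generalizing b with
  | nil => rfl
  | cons i t ih =>
    simp only [List.foldl_cons]
    split_ifs with h
    · rw [ih]; simp
    · exact ih b

-- value of position j after B's scatter loop
theorem pv_scatter_get (L : List Int) (cs : List Char) (b : List Char)
    (hb : b.length = cs.length) (j : Nat) (hj : j < cs.length) :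
    (L.foldl (fun b i =>
        if 0 ≤ i ∧ i < (cs.length : Int) then b.set i.toNat (cs.getD i.toNat '_') else b) b)[j]?
      = if (j : Int) ∈ L then some (cs.getD j '_') else b[j]? := by
  induction L generalizing b with
  | nil => simp
  | cons i t ih =>
    simp only [List.foldl_cons]
    by_cases hg : 0 ≤ i ∧ i < (cs.length : Int)
    · rw [if_pos hg]
      by_cases hij : i = (j : Int)
      · subst hij
        rw [ih _ (by simp [hb])]
        have hset : (b.set (Int.toNat ((j : Nat) : Int)) (cs.getD (Int.toNat ((j : Nat) : Int)) '_'))[j]?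
            = some (cs.getD j '_') := by
          simp [hb, hj]
        rw [hset]
        simp [List.mem_cons]
      · have hjn : i.toNat ≠ j := by omega
        have hji : ¬ ((j : Nat) : Int) = i := fun h => hij h.symm
        rw [ih _ (by simp [hb])]
        have hset : (b.set i.toNat (cs.getD i.toNat '_'))[j]? = b[j]? := by
          rw [List.getElem?_set]; simp [hjn]
        rw [hset]
        simp [List.mem_cons, hji]
    · rw [if_neg hg]
      have hji : ¬ ((j : Nat) : Int) = i := by
        intro h; exact hg ⟨by omega, by omega⟩
      rw [ih b hb]
      simp [List.mem_cons, hji]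

-- A's gather loop over an arbitrary list of in-range indexes
theorem pv_gather (indexList : List Int) (cs : List Char) (l : List Int)
    (hl : ∀ i ∈ l, 0 ≤ i ∧ i < (cs.length : Int)) :
    (l.flatMap
        (fun i => if indexList.contains i then (PySem.List.pyGet? cs i).toList else ['_']))
      = l.map (fun i => pvCell indexList cs i.toNat) := by
  induction l with
  | nil => rfl
  | cons i t ih =>
    obtain ⟨hi0, hin⟩ := hl i List.mem_cons_self
    obtain ⟨k, rfl⟩ : ∃ k : Nat, i = (k : Int) := ⟨i.toNat, (Int.toNat_of_nonneg hi0).symm⟩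
    have hk : k < cs.length := by exact_mod_cast hin
    rw [List.flatMap_cons, ih (fun x hx => hl x (List.mem_cons_of_mem _ hx)), List.map_cons]
    unfold pvCell
    split_ifs with h h2 h3
    · rw [PySem.List.pyGet?_natCast]
      simp [List.getElem?_eq_getElem hk, List.getD_eq_getElem?_getD]
    · exact absurd (by simpa using h) h2
    · exact absurd (by simpa using h3) h
    · rfl

-- A's characters are the map of pvCell over range n
theorem pv_A_chars (indexList : List Int) (cs : List Char) :
    ((PySem.List.pyRange 0 cs.length 1).foldl
        (fun update i =>
          if indexList.contains i then update ++ (PySem.List.pyGet? cs i).toList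
          else update ++ ['_']) [])
      = (List.range cs.length).map (pvCell indexList cs) := by
  have hf : (fun (update : List Char) (i : Int) =>
        if indexList.contains i then update ++ (PySem.List.pyGet? cs i).toList
        else update ++ ['_'])
      = (fun update i => update ++
          (if indexList.contains i then (PySem.List.pyGet? cs i).toList else ['_'])) := by
    funext u i; split_ifs <;> rfl
  rw [hf, PySem.List.foldl_append_eq_flatMap
    (fun i => if indexList.contains i then (PySem.List.pyGet? cs i).toList else ['_']),
    List.nil_append,
    pv_gather indexList cs _ (fun i hi => by
      rcases (PySem.List.mem_pyRange_one).mp hi with ⟨h1, h2⟩; exact ⟨h1, h2⟩)]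
  rw [PySem.List.pyRange_one]
  simp [List.map_map, Function.comp]

-- B's characters are the same map
theorem pv_B_chars (indexList : List Int) (cs : List Char) :
    (indexList.foldl
        (fun b i =>
          if 0 ≤ i ∧ i < (cs.length : Int) then b.set i.toNat (cs.getD i.toNat '_') else b)
        (List.replicate cs.length '_'))
      = (List.range cs.length).map (pvCell indexList cs) := by
  apply List.ext_getElem?
  intro j
  by_cases hj : j < cs.length
  · rw [pv_scatter_get indexList cs _ (by simp) j hj,
      List.getElem?_map, List.getElem?_range hj]
    by_cases h : ((j : Nat) : Int) ∈ indexList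
    · simp [pvCell, h]
    · simp [pvCell, h, hj]
  · have h1 : (indexList.foldl
        (fun b i =>
          if 0 ≤ i ∧ i < (cs.length : Int) then b.set i.toNat (cs.getD i.toNat '_') else b)
        (List.replicate cs.length '_')).length = cs.length := by
      rw [pv_scatter_length]; simp
    rw [List.getElem?_eq_none (by omega), List.getElem?_eq_none (by simp; omega)]

-- ===== VERDICT (by name: the statement is the Claim_ definition above) =====
theorem replaceIndexes_spec : Claim_equal_replaceIndexes := by
  intro indexList secretWord _
  unfold Spec_replaceIndexes replaceIndexes replaceIndexes_alt
  simp only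
  rw [pv_A_chars, pv_B_chars]
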